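-- pv_equiv track=rewrite | github.com/Prashantpandey2398/Implementation-of-Advanced-Algorithms-Using-Python | Load_Balancing.py | find_loads
-- ===== SOURCE A (Python) =====
-- def find_loads(loads,n,m,lo1):
--     final_loads=[]
--     machine_loads=[]
--     for i in range(0,n):
--         load=[]
--         load.append(lo1[i])
--         machine_loads.append(loads[i])
--         final_loads.append(load)
--
--     for i in range(n,m):
--         l=min(machine_loads)
--         ind = machine_loads.index(l)
--         final_loads[ind].append(lo1[i])
--         machine_loads[ind]+=(loads[i])
--
--     return (machine_loads,final_loads)
-- ===== SOURCE B (Python) =====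
-- # Leftist min-heap of (load, machine_index) pairs: pops the least-loaded machine
-- # (Python's first-min tie-break = lexicographic order on (load, index)) instead of
-- # A's min()+index() scans; phase 1 uses slices.
--
-- def _rank(h):
--     return 0 if h is None else h[2]
--
-- def _make(load, idx, a, b):
--     if _rank(a) >= _rank(b):
--         return (load, idx, _rank(b) + 1, a, b)
--     else:
--         return (load, idx, _rank(a) + 1, b, a)
--
-- def _merge(h1, h2):
--     if h1 is None:
--         return h2
--     if h2 is None:
--         return h1
--     if (h1[0], h1[1]) <= (h2[0], h2[1]):
--         return _make(h1[0], h1[1], h1[3], _merge(h1[4], h2))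
--     else:
--         return _make(h2[0], h2[1], h2[3], _merge(h1, h2[4]))
--
-- def find_loads(loads, n, m, lo1):
--     k = n if n > 0 else 0
--     machine_loads = loads[:k]
--     final_loads = [[x] for x in lo1[:k]]
--     if n < m:
--         heap = None
--         for i, x in enumerate(machine_loads):
--             heap = _merge(heap, (x, i, 1, None, None))
--         for i in range(n, m):
--             l, ind = heap[0], heap[1]
--             final_loads[ind].append(lo1[i])
--             machine_loads[ind] = l + loads[i]
--             heap = _merge(_merge(heap[3], heap[4]), (machine_loads[ind], ind, 1, None, None))
--     return (machine_loads, final_loads)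
-- ===== Notes on version B (the rewrite author's own statement) =====
-- stated objective: alternative
-- what changed: Replaces A's per-job min()+index() linear scans over machine_loads with a leftist min-heap of (load, machine_index) pairs whose lexicographic order reproduces Python's first-min tie-breaking; phase 1 is built by slicing instead of an append loop.
import Mathlib
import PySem

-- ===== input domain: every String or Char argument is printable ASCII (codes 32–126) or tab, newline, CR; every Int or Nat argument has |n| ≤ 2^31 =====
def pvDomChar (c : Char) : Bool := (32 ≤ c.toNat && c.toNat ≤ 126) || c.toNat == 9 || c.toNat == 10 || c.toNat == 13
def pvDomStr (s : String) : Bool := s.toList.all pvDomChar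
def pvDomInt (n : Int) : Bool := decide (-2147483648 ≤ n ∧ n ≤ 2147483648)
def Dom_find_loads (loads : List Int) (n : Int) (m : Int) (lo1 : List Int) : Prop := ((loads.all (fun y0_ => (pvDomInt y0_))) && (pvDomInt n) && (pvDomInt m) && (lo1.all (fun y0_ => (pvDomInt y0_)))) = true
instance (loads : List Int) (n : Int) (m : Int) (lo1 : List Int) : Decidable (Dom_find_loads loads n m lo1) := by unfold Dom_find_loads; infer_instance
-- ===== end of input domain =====

-- B replaces A's per-job min()+index() scans with a leftist heap of (load, machine) pairs
-- ordered lexicographically (Python's first-min tie-break): an alternative algorithm.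


-- ===== PORT A =====
-- loop body of A's second for-loop (min + first index, then in-place updates)
def stepA_find_loads (loads : List Int) (lo1 : List Int)
    (st : List Int × List (List Int)) (i : Int) : List Int × List (List Int) :=
  match PySem.List.min? st.1 (fun x => x) with
  | none => st          -- unreachable under Pre_: Python raises ValueError on min([])
  | some l =>
    match PySem.List.index? st.1 l with
    | none => st        -- unreachable: l ∈ machine_loads
    | some ind =>
      (PySem.List.pySetD st.1 (ind : Int)
         (PySem.List.pyGetD st.1 (ind : Int) 0 + PySem.List.pyGetD loads i 0),
       PySem.List.pySetD st.2 (ind : Int)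
         (PySem.List.pyGetD st.2 (ind : Int) [] ++ [PySem.List.pyGetD lo1 i 0]))

def find_loads (loads : List Int) (n : Int) (m : Int) (lo1 : List Int) : List Int × List (List Int) :=
  let init := (PySem.List.pyRange 0 n 1).foldl
    (fun (st : List Int × List (List Int)) i =>
      (st.1 ++ [PySem.List.pyGetD loads i 0], st.2 ++ [[PySem.List.pyGetD lo1 i 0]]))
    ([], [])
  let res := (PySem.List.pyRange n m 1).foldl (stepA_find_loads loads lo1) init
  (res.1, res.2)

-- ===== PORT B =====
-- leftist min-heap of (load, machine index); Python's `None` is `nil`,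
-- tuples (load, idx, rank, left, right) are `node`
inductive SHeap where
  | nil : SHeap
  | node : Int → Int → Int → SHeap → SHeap → SHeap
deriving DecidableEq, Repr

-- _rank from Source B
def hrank : SHeap → Int
  | .nil => 0
  | .node _ _ rk _ _ => rk

-- _make from Source B
def hmake (load idx : Int) (a b : SHeap) : SHeap :=
  if hrank a ≥ hrank b then .node load idx (hrank b + 1) a b
  else .node load idx (hrank a + 1) b a

-- _merge from Source B; the tuple comparison (h1[0],h1[1]) <= (h2[0],h2[1]) is lexicographic
def hmerge : SHeap → SHeap → SHeap
  | .nil, h2 => h2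
  | .node a i rk l r, .nil => .node a i rk l r
  | .node a i rk l r, .node b j rk' l' r' =>
    if a < b ∨ (a = b ∧ i ≤ j) then
      hmake a i l (hmerge r (.node b j rk' l' r'))
    else
      hmake b j l' (hmerge (.node a i rk l r) r')
termination_by h1 h2 => sizeOf h1 + sizeOf h2

-- loop body of B's second for-loop (pop heap root, update, push back)
def stepB_find_loads (loads : List Int) (lo1 : List Int)
    (st : List Int × List (List Int) × SHeap) (i : Int) : List Int × List (List Int) × SHeap :=
  match st.2.2 with
  | .nil => st          -- unreachable under Pre_: Python raises TypeError subscripting None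
  | .node l ind _ left right =>
    let v := l + PySem.List.pyGetD loads i 0
    (PySem.List.pySetD st.1 ind v,
     PySem.List.pySetD st.2.1 ind (PySem.List.pyGetD st.2.1 ind [] ++ [PySem.List.pyGetD lo1 i 0]),
     hmerge (hmerge left right) (.node v ind 1 .nil .nil))

def find_loads_alt (loads : List Int) (n : Int) (m : Int) (lo1 : List Int) : List Int × List (List Int) :=
  let k := if 0 < n then n else 0
  let ml := PySem.List.slice loads none (some k)
  let fl := (PySem.List.slice lo1 none (some k)).map (fun x => [x])
  if n < m then
    let heap := (PySem.List.enumerate ml 0).foldl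
      (fun h p => hmerge h (.node p.2 p.1 1 .nil .nil)) .nil
    let res := (PySem.List.pyRange n m 1).foldl (stepB_find_loads loads lo1) (ml, fl, heap)
    (res.1, res.2.1)
  else (ml, fl)

-- ===== PRECONDITION & SPEC =====
-- Pre_ excludes exactly the inputs where A raises: IndexError when n (or m, if m > n)
-- exceeds a list length, and ValueError (min of empty list) when m > n but n < 1.
def Pre_find_loads (loads : List Int) (n : Int) (m : Int) (lo1 : List Int) : Prop :=
  n ≤ loads.length ∧ n ≤ lo1.length ∧
  (n < m → 1 ≤ n ∧ m ≤ loads.length ∧ m ≤ lo1.length)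
instance (loads : List Int) (n : Int) (m : Int) (lo1 : List Int) : Decidable (Pre_find_loads loads n m lo1) := by unfold Pre_find_loads; infer_instance

def pvWitness_find_loads : List Int × Int × Int × List Int := ([2, 3, 1], 2, 3, [1, 1, 1])

def Spec_find_loads (loads : List Int) (n : Int) (m : Int) (lo1 : List Int) (out : List Int × List (List Int)) : Prop := out = find_loads_alt loads n m lo1
instance (loads : List Int) (n : Int) (m : Int) (lo1 : List Int) (out : List Int × List (List Int)) : Decidable (Spec_find_loads loads n m lo1 out) := by unfold Spec_find_loads; infer_instance

-- ===== CLAIM (what is proved, stated in full; the proofs are below) =====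
def Claim_equal_find_loads : Prop := ∀ (loads : List Int) (n : Int) (m : Int) (lo1 : List Int), Dom_find_loads loads n m lo1 → Pre_find_loads loads n m lo1 → Spec_find_loads loads n m lo1 (find_loads loads n m lo1)

-- ===== LEMMAS AND PROOFS =====

-- elements of a heap, as (load, index) pairs
def elems : SHeap → List (Int × Int)
  | .nil => []
  | .node a i _ l r => (a, i) :: (elems l ++ elems r)

-- lexicographic order used by Python tuple comparison
def lep (p q : Int × Int) : Prop := p.1 < q.1 ∨ (p.1 = q.1 ∧ p.2 ≤ q.2)

-- skew-heap order property
def HOrd : SHeap → Prop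
  | .nil => True
  | .node a i _ l r => HOrd l ∧ HOrd r ∧ (∀ x ∈ elems l, lep (a, i) x) ∧ (∀ x ∈ elems r, lep (a, i) x)

-- (value, index) pairs of a list, indices starting at s
def pairs : List Int → Int → List (Int × Int)
  | [], _ => []
  | x :: t, s => (x, s) :: pairs t (s + 1)

theorem elems_hmake (load idx : Int) (a b : SHeap) :
    (elems (hmake load idx a b)).Perm ((load, idx) :: (elems a ++ elems b)) := by
  unfold hmake
  split_ifs
  · simp [elems]
  · simp only [elems]
    exact List.Perm.cons _ List.perm_append_comm

theorem elems_hmerge (h1 h2 : SHeap) : (elems (hmerge h1 h2)).Perm (elems h1 ++ elems h2) := by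
  fun_induction hmerge h1 h2 with
  | case1 h2 => simp [elems]
  | case2 a i rk l r => simp [elems]
  | case3 a i rk l r b j rk' l' r' hc ih =>
    refine (elems_hmake _ _ _ _).trans ?_
    rw [List.perm_iff_count] at ih ⊢
    intro x
    have h := ih x
    simp only [elems, List.count_append, List.count_cons] at h ⊢
    split_ifs at h ⊢ <;> omega
  | case4 a i rk l r b j rk' l' r' hc ih =>
    refine (elems_hmake _ _ _ _).trans ?_
    rw [List.perm_iff_count] at ih ⊢
    intro x
    have h := ih x
    simp only [elems, List.count_append, List.count_cons] at h ⊢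
    split_ifs at h ⊢ <;> omega

theorem lep_trans {p q r : Int × Int} (h1 : lep p q) (h2 : lep q r) : lep p r := by
  unfold lep at *; rcases h1 with h | ⟨h, h'⟩ <;> rcases h2 with g | ⟨g, g'⟩ <;>
    first | (left; omega) | (right; constructor <;> omega)

theorem hord_root {a i rk : Int} {l r : SHeap} (o : HOrd (.node a i rk l r)) :
    ∀ x ∈ elems (.node a i rk l r), lep (a, i) x := by
  intro x hx
  simp only [elems, List.mem_cons, List.mem_append] at hx
  rcases hx with rfl | h | h
  · exact Or.inr ⟨rfl, le_refl _⟩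
  · exact o.2.2.1 x h
  · exact o.2.2.2 x h

theorem hord_hmake (load idx : Int) (a b : SHeap) (oa : HOrd a) (ob : HOrd b)
    (ba : ∀ x ∈ elems a, lep (load, idx) x) (bb : ∀ x ∈ elems b, lep (load, idx) x) :
    HOrd (hmake load idx a b) := by
  unfold hmake
  split_ifs
  · exact ⟨oa, ob, ba, bb⟩
  · exact ⟨ob, oa, bb, ba⟩

theorem hord_hmerge (h1 h2 : SHeap) (o1 : HOrd h1) (o2 : HOrd h2) : HOrd (hmerge h1 h2) := by
  fun_induction hmerge h1 h2 with
  | case1 h2 => exact o2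
  | case2 a i rk l r => exact o1
  | case3 a i rk l r b j rk' l' r' hc ih =>
    obtain ⟨ol, or, bl, br⟩ := o1
    refine hord_hmake _ _ _ _ ol (ih or o2) bl ?_
    intro x hx
    have hx' := (elems_hmerge r (.node b j rk' l' r')).mem_iff.mp hx
    rcases List.mem_append.mp hx' with h | h
    · exact br x h
    · refine lep_trans ?_ (hord_root o2 x h)
      rcases hc with h' | ⟨h', h''⟩
      · exact Or.inl h'
      · exact Or.inr ⟨h', h''⟩
  | case4 a i rk l r b j rk' l' r' hc ih =>
    obtain ⟨ol', or', bl', br'⟩ := o2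
    refine hord_hmake _ _ _ _ ol' (ih o1 or') bl' ?_
    intro x hx
    have hx' := (elems_hmerge (.node a i rk l r) r').mem_iff.mp hx
    rcases List.mem_append.mp hx' with h | h
    · refine lep_trans ?_ (hord_root o1 x h)
      unfold lep; push Not at hc; rcases hc with ⟨h1', h2'⟩
      by_cases hab : b = a
      · subst hab; right; exact ⟨rfl, by omega⟩
      · left; omega
    · exact br' x h

theorem mem_pairs {p : Int × Int} {l : List Int} {s : Int} :
    p ∈ pairs l s ↔ ∃ (k : Nat) (hk : k < l.length), p = (l[k], s + k) := by
  induction l generalizing s with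
  | nil => simp [pairs]
  | cons x t ih =>
    simp only [pairs, List.mem_cons, ih]
    constructor
    · rintro (h | ⟨k, hk, rfl⟩)
      · exact ⟨0, by simp, by simp [h]⟩
      · exact ⟨k + 1, by simpa using hk, by push_cast; simp; ring_nf⟩
    · rintro ⟨k, hk, rfl⟩
      cases k with
      | zero => left; simp
      | succ k => right; exact ⟨k, by simpa using hk, by push_cast; simp; ring_nf⟩

theorem length_pairs (l : List Int) (s : Int) : (pairs l s).length = l.length := by
  induction l generalizing s with
  | nil => rfl
  | cons x t ih => simp [pairs, ih]

theorem getElem_pairs (l : List Int) (s : Int) (k : Nat) (hk : k < l.length) :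
    (pairs l s)[k]'(by rw [length_pairs]; exact hk) = (l[k], s + k) := by
  induction l generalizing s k with
  | nil => simp at hk
  | cons x t ih =>
    cases k with
    | zero => simp [pairs]
    | succ k =>
      have hk' : k < t.length := by simpa using hk
      simp only [pairs, List.getElem_cons_succ]
      rw [ih (s + 1) k hk']
      congr 1
      push_cast
      omega

theorem pairs_set (l : List Int) (s : Int) (k : Nat) (v : Int) (hk : k < l.length) :
    pairs (l.set k v) s = (pairs l s).set k (v, s + k) := by
  induction l generalizing s k with
  | nil => simp at hk
  | cons x t ih =>
    cases k with
    | zero => simp [pairs]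
    | succ k =>
      have hk' : k < t.length := by simpa using hk
      have hcast : s + 1 + (k : Int) = s + ((k + 1 : Nat) : Int) := by push_cast; omega
      simp only [pairs, List.set_cons_succ]
      rw [ih (s + 1) k hk', hcast]

-- any list is a permutation of (its k-th element) :: (itself minus index k)
theorem perm_cons_eraseIdx {α : Type} (l : List α) (k : Nat) (hk : k < l.length) :
    l.Perm (l[k] :: l.eraseIdx k) := by
  induction l generalizing k with
  | nil => simp at hk
  | cons x t ih =>
    cases k with
    | zero => simp
    | succ k =>
      have hk' : k < t.length := by simpa using hk
      simp only [List.getElem_cons_succ, List.eraseIdx_cons_succ]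
      exact ((ih k hk').cons x).trans (List.Perm.swap _ _ _)

-- the crux: with the invariant, the heap root is exactly (min ml, first index of min)
theorem root_is_min (ml : List Int) (a i rk : Int) (l r : SHeap)
    (ho : HOrd (.node a i rk l r)) (hp : (elems (.node a i rk l r)).Perm (pairs ml 0)) :
    PySem.List.min? ml (fun x => x) = some a ∧
    ∃ k : Nat, i = (k : Int) ∧ (∃ hk : k < ml.length, ml[k] = a) ∧
      PySem.List.index? ml a = some k := by
  have hmem : (a, i) ∈ pairs ml 0 := hp.mem_iff.mp (by simp [elems])
  obtain ⟨k, hk, hki⟩ := mem_pairs.mp hmem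
  have hik : i = (k : Int) := by have := congrArg Prod.snd hki; simpa using this
  have hak : ml[k] = a := by have := congrArg Prod.fst hki; simp at this; omega
  -- every element of ml is ≥ a, and earlier equal elements are impossible
  have hall : ∀ (j : Nat) (hj : j < ml.length), a < ml[j] ∨ (a = ml[j] ∧ (k : Int) ≤ (j : Int)) := by
    intro j hj
    have hmem' : (ml[j], (j : Int)) ∈ elems (SHeap.node a i rk l r) :=
      hp.symm.mem_iff.mp (mem_pairs.mpr ⟨j, hj, by simp⟩)
    have := hord_root ho _ hmem'
    unfold lep at this
    simpa [hik] using this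
  have hne : ml ≠ [] := by
    intro h; subst h; simp at hk
  constructor
  · -- min? = some a
    obtain ⟨v, hv⟩ := Option.ne_none_iff_exists'.mp
      (fun h => hne ((PySem.List.min?_eq_none_iff ml (fun x => x)).mp h))
    have hvmem := PySem.List.min?_mem hv
    have hvmin := PySem.List.min?_id_le hv
    obtain ⟨jv, hjv, rfl⟩ := List.mem_iff_getElem.mp hvmem
    have h1 : a ≤ ml[jv] := by rcases hall jv hjv with h | ⟨h, _⟩ <;> omega
    have h2 : ml[jv] ≤ a := by
      have := hvmin a (hak ▸ List.getElem_mem hk)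
      simpa using this
    rw [hv]
    congr 1
    omega
  · refine ⟨k, hik, ⟨hk, hak⟩, ?_⟩
    rw [PySem.List.index?_eq_some_iff ml a k]
    refine ⟨ml.take k, ml.drop (k + 1), ?_, by simp [hk.le], ?_⟩
    · conv_lhs => rw [← List.take_append_drop k ml]
      rw [List.drop_eq_getElem_cons hk, hak]
    · intro hmem'
      obtain ⟨jt, hjt, hjv⟩ := List.mem_iff_getElem.mp hmem'
      have hjt' : jt < k := by simpa [hk.le] using hjt
      rw [List.getElem_take] at hjv
      rcases hall jt (by omega) with h | ⟨h, h'⟩ <;> omega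

theorem stepAB (loads lo1 : List Int) (ml : List Int) (fl : List (List Int)) (h : SHeap)
    (i : Int) (ho : HOrd h) (hp : (elems h).Perm (pairs ml 0)) (hne : ml ≠ []) :
    stepA_find_loads loads lo1 (ml, fl) i =
      ((stepB_find_loads loads lo1 (ml, fl, h) i).1, (stepB_find_loads loads lo1 (ml, fl, h) i).2.1) ∧
    HOrd (stepB_find_loads loads lo1 (ml, fl, h) i).2.2 ∧
    (elems (stepB_find_loads loads lo1 (ml, fl, h) i).2.2).Perm
      (pairs (stepB_find_loads loads lo1 (ml, fl, h) i).1 0) ∧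
    (stepB_find_loads loads lo1 (ml, fl, h) i).1 ≠ [] := by
  cases h with
  | nil =>
    exfalso
    have hpe : pairs ml 0 = [] := (List.Perm.nil_eq (by simpa [elems] using hp)).symm
    have : ml.length = 0 := by rw [← length_pairs ml 0, hpe]; rfl
    exact hne (List.eq_nil_of_length_eq_zero this)
  | node a i' rk l r =>
    obtain ⟨hmin, k, hik, ⟨hk, hak⟩, hidx⟩ := root_is_min ml a i' rk l r ho hp
    have hget : PySem.List.pyGetD ml ((k : Nat) : Int) 0 = a := by
      rw [PySem.List.pyGetD_natCast]
      simp [List.getD_eq_getElem?_getD, List.getElem?_eq_getElem hk, hak]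
    have hstepA : stepA_find_loads loads lo1 (ml, fl) i =
        (ml.set k (a + PySem.List.pyGetD loads i 0),
         fl.set k (PySem.List.pyGetD fl ((k : Nat) : Int) [] ++ [PySem.List.pyGetD lo1 i 0])) := by
      unfold stepA_find_loads
      simp only [hmin, hidx, hget, PySem.List.pySetD_natCast]
    have hstepB : stepB_find_loads loads lo1 (ml, fl, .node a i' rk l r) i =
        (ml.set k (a + PySem.List.pyGetD loads i 0),
         fl.set k (PySem.List.pyGetD fl ((k : Nat) : Int) [] ++ [PySem.List.pyGetD lo1 i 0]),
         hmerge (hmerge l r) (.node (a + PySem.List.pyGetD loads i 0) i' 1 .nil .nil)) := by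
      unfold stepB_find_loads
      simp only [hik, PySem.List.pySetD_natCast]
    obtain ⟨ol, or, _, _⟩ := ho
    refine ⟨by rw [hstepA, hstepB], ?_, ?_, ?_⟩
    · rw [hstepB]
      exact hord_hmerge _ _ (hord_hmerge l r ol or) ⟨trivial, trivial, by simp [elems], by simp [elems]⟩
    · rw [hstepB]
      -- elems of the new heap ~ pairs of the updated list
      have e1 : (elems (hmerge (hmerge l r) (.node (a + PySem.List.pyGetD loads i 0) i' 1 .nil .nil))).Perm
          ((elems l ++ elems r) ++ [(a + PySem.List.pyGetD loads i 0, i')]) := by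
        refine (elems_hmerge _ _).trans ?_
        refine List.Perm.append ?_ ?_
        · exact elems_hmerge l r
        · simp [elems]
      have hpk : (pairs ml 0)[k]'(by rw [length_pairs]; exact hk) = (a, i') := by
        rw [getElem_pairs ml 0 k hk, hak, hik]; simp
      have e2 : (elems l ++ elems r).Perm ((pairs ml 0).eraseIdx k) := by
        have h3 : (pairs ml 0).Perm ((a, i') :: (pairs ml 0).eraseIdx k) := by
          have := perm_cons_eraseIdx (pairs ml 0) k (by rw [length_pairs]; exact hk)
          rwa [hpk] at this
        have h4 : ((a, i') :: (elems l ++ elems r)).Perm ((a, i') :: (pairs ml 0).eraseIdx k) := by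
          refine List.Perm.trans ?_ h3
          simpa [elems] using hp
        exact h4.cons_inv
      have e3 : pairs (ml.set k (a + PySem.List.pyGetD loads i 0)) 0 =
          (pairs ml 0).set k (a + PySem.List.pyGetD loads i 0, i') := by
        rw [pairs_set ml 0 k _ hk, hik]; simp
      have e4 : ((pairs ml 0).set k (a + PySem.List.pyGetD loads i 0, i')).Perm
          ((a + PySem.List.pyGetD loads i 0, i') :: (pairs ml 0).eraseIdx k) := by
        have h5 := perm_cons_eraseIdx ((pairs ml 0).set k (a + PySem.List.pyGetD loads i 0, i')) k
          (by rw [List.length_set, length_pairs]; exact hk)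
        rwa [List.getElem_set_self, List.eraseIdx_set_eq] at h5
      refine e1.trans ?_
      refine (List.perm_append_singleton _ _).trans ?_
      refine ((e2.cons _).trans e4.symm).trans ?_
      rw [← e3]
    · rw [hstepB]
      intro hcon
      have : ml = [] := by simpa using congrArg List.length hcon
      exact hne this

theorem loopAB (loads lo1 : List Int) (js : List Int) :
    ∀ (ml : List Int) (fl : List (List Int)) (h : SHeap),
    HOrd h → (elems h).Perm (pairs ml 0) → ml ≠ [] →
    js.foldl (stepA_find_loads loads lo1) (ml, fl) =
      (((js.foldl (stepB_find_loads loads lo1) (ml, fl, h)).1),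
       ((js.foldl (stepB_find_loads loads lo1) (ml, fl, h)).2.1)) := by
  induction js with
  | nil => intro ml fl h _ _ _; rfl
  | cons jx jt ih =>
    intro ml fl h ho hp hne
    simp only [List.foldl_cons]
    obtain ⟨heq, ho', hp', hne'⟩ := stepAB loads lo1 ml fl h jx ho hp hne
    rw [heq]
    exact ih (stepB_find_loads loads lo1 (ml, fl, h) jx).1
      (stepB_find_loads loads lo1 (ml, fl, h) jx).2.1
      (stepB_find_loads loads lo1 (ml, fl, h) jx).2.2 ho' hp' hne' 

-- phase 1 of A: the append-fold is the pair of maps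
theorem foldA_init {α β : Type} (f : Int → α) (g : Int → β) (xs : List Int) :
    ∀ (acc1 : List α) (acc2 : List β),
    xs.foldl (fun (st : List α × List β) i => (st.1 ++ [f i], st.2 ++ [g i])) (acc1, acc2) =
      (acc1 ++ xs.map f, acc2 ++ xs.map g) := by
  induction xs with
  | nil => simp
  | cons x t ih => intro acc1 acc2; simp [List.foldl_cons, ih, List.append_assoc]

-- heap build: folding singleton merges over any pair list
theorem build_heap (ps : List (Int × Int)) :
    ∀ (h0 : SHeap), HOrd h0 →
    HOrd (ps.foldl (fun h p => hmerge h (.node p.1 p.2 1 .nil .nil)) h0) ∧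
    (elems (ps.foldl (fun h p => hmerge h (.node p.1 p.2 1 .nil .nil)) h0)).Perm
      (elems h0 ++ ps) := by
  induction ps with
  | nil => intro h0 o0; exact ⟨o0, by simp⟩
  | cons p pt ih =>
    intro h0 o0
    simp only [List.foldl_cons]
    have o1 : HOrd (hmerge h0 (.node p.1 p.2 1 .nil .nil)) :=
      hord_hmerge _ _ o0 ⟨trivial, trivial, by simp [elems], by simp [elems]⟩
    obtain ⟨oa, ob⟩ := ih _ o1
    refine ⟨oa, ob.trans ?_⟩
    refine ((elems_hmerge h0 _).append_right pt).trans ?_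
    rw [List.append_assoc]
    simp [elems]

theorem map_pyGetD_take (xs : List Int) (d : Int) (n : Int) (h0 : 0 ≤ n) (h1 : n ≤ (xs.length : Int)) :
    (PySem.List.pyRange 0 n 1).map (fun i => PySem.List.pyGetD xs i d) = xs.take n.toNat := by
  apply List.ext_getElem
  · simp only [List.length_map, PySem.List.length_pyRange_one, List.length_take]
    omega
  · intro kk hh1 hh2
    have hkn : kk < n.toNat := by
      simpa [PySem.List.length_pyRange_one] using hh1
    have hkx : kk < xs.length := by
      simp only [List.length_take] at hh2; omega
    simp only [List.getElem_map, PySem.List.getElem_pyRange_one, List.getElem_take]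
    have h0' : (0 : Int) + (kk : Int) = ((kk : Nat) : Int) := by omega
    rw [h0', PySem.List.pyGetD_natCast]
    simp [List.getD_eq_getElem?_getD, List.getElem?_eq_getElem hkx]

theorem map_pyGetD_take_wrap (xs : List Int) (d : Int) (n : Int) (h0 : 0 ≤ n) (h1 : n ≤ (xs.length : Int)) :
    (PySem.List.pyRange 0 n 1).map (fun i => [PySem.List.pyGetD xs i d]) = (xs.take n.toNat).map (fun x => [x]) := by
  rw [← map_pyGetD_take xs d n h0 h1, List.map_map]
  rfl

theorem pairs_eq_enum (xs : List Int) : ∀ s : Int, (PySem.List.enumerate xs s).map (fun p => (p.2, p.1)) = pairs xs s := by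
  induction xs with
  | nil => intro s; simp [PySem.List.enumerate_nil, pairs]
  | cons x t ih =>
    intro s
    rw [PySem.List.enumerate_cons]
    simp only [List.map_cons, pairs, ih]

-- ===== VERDICT (by name: the statement is the Claim_ definition above) =====
theorem find_loads_spec : Claim_equal_find_loads := by
  intro loads n m lo1 _ hpre
  obtain ⟨h1, h2, h3⟩ := hpre
  unfold Spec_find_loads
  simp only [find_loads, find_loads_alt]
  rw [foldA_init (fun i => PySem.List.pyGetD loads i 0) (fun i => [PySem.List.pyGetD lo1 i 0])]
  simp only [List.nil_append]
  by_cases hnm : n < m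
  · obtain ⟨hn1, hm1, hm2⟩ := h3 hnm
    rw [if_pos hnm, if_pos (show (0 : Int) < n by omega),
        PySem.List.slice_to loads (by omega), PySem.List.slice_to lo1 (by omega),
        map_pyGetD_take loads 0 n (by omega) h1,
        map_pyGetD_take_wrap lo1 0 n (by omega) h2]
    have hheap :
        (PySem.List.enumerate (loads.take n.toNat) 0).foldl
          (fun h p => hmerge h (.node p.2 p.1 1 .nil .nil)) .nil
        = (pairs (loads.take n.toNat) 0).foldl
            (fun h p => hmerge h (.node p.1 p.2 1 .nil .nil)) .nil := by
      rw [← pairs_eq_enum, List.foldl_map]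
    rw [hheap]
    obtain ⟨ho, hp⟩ := build_heap (pairs (loads.take n.toNat) 0) .nil trivial
    have hp' : (elems ((pairs (loads.take n.toNat) 0).foldl
        (fun h p => hmerge h (.node p.1 p.2 1 .nil .nil)) .nil)).Perm
        (pairs (loads.take n.toNat) 0) := by
      simpa [elems] using hp
    have hne : loads.take n.toNat ≠ [] := by
      intro hcon
      have := congrArg List.length hcon
      simp only [List.length_take, List.length_nil] at this
      omega
    rw [loopAB loads lo1 (PySem.List.pyRange n m 1) (loads.take n.toNat)
      ((lo1.take n.toNat).map (fun x => [x])) _ ho hp' hne]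
  · rw [if_neg hnm, PySem.List.pyRange_one_eq_nil (show m ≤ n by omega)]
    simp only [List.foldl_nil]
    by_cases hn0 : 0 < n
    · rw [if_pos hn0, PySem.List.slice_to loads (by omega), PySem.List.slice_to lo1 (by omega),
          map_pyGetD_take loads 0 n (by omega) h1,
          map_pyGetD_take_wrap lo1 0 n (by omega) h2]
    · rw [if_neg hn0, PySem.List.pyRange_one_eq_nil (show n ≤ (0 : Int) by omega)]
      have hs1 : PySem.List.slice loads none (some (0 : Int)) = loads.take (0 : Int).toNat :=
        PySem.List.slice_to loads (by omega)
      have hs2 : PySem.List.slice lo1 none (some (0 : Int)) = lo1.take (0 : Int).toNat :=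
        PySem.List.slice_to lo1 (by omega)
      simp [hs1, hs2]
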